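-- pv_equiv track=rewrite | github.com/ifauzeee/WZML-X | bot/helper/ext_utils/bot_utils.py | handleIndex
-- ===== SOURCE A (Python) =====
-- def handleIndex(index, dic):
--     while True:
--         if abs(index) >= len(dic):
--             if index < 0:
--                 index = len(dic) - abs(index)
--             elif index > 0:
--                 index = index - len(dic)
--         else:
--             break
--     return index
-- ===== SOURCE B (Python) =====
-- def handleIndex(index, dic):
--     n = len(dic)
--     return index % n if index >= 0 else -((-index) % n)
-- ===== Notes on version B (the rewrite author's own statement) =====
-- stated objective: simpler
-- what changed: Replaces A's step-by-step while loop that repeatedly adds/subtracts len(dic) with a single sign-preserving modulo expression.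
import Mathlib
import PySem

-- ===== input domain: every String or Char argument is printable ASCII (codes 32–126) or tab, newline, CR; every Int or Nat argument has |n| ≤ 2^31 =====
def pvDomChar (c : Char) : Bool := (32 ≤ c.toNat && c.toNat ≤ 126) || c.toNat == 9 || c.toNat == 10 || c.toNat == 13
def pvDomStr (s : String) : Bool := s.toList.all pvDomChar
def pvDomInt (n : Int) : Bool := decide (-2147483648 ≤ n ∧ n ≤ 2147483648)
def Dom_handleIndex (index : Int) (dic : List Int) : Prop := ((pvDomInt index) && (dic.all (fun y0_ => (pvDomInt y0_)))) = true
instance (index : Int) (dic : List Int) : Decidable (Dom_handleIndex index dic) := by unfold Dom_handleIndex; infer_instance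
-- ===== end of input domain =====

-- B replaces A's repeated add/subtract-len while loop by a single sign-preserving modulo expression (simpler).

-- ===== PORT A =====
-- the 'while True' loop of A; the '0 < n' conjunct is only a totality guard:
-- with n = 0 and index ≠ 0 the Python loop never terminates (excluded by Pre_).
def handleIndexGo (n : Nat) (index : Int) : Int :=
  if 0 < n ∧ (n : Int) ≤ |index| then
    if index < 0 then handleIndexGo n ((n : Int) - |index|)
    else if index > 0 then handleIndexGo n (index - (n : Int))
    else index
  else index
termination_by index.natAbs
decreasing_by all_goals (simp only [abs] at *; omega)

def handleIndex (index : Int) (dic : List Int) : Int :=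
  handleIndexGo dic.length index

-- ===== PORT B =====
def handleIndex_alt (index : Int) (dic : List Int) : Int :=
  let n : Int := dic.length
  if index ≥ 0 then PySem.Int.mod index n else -(PySem.Int.mod (-index) n)

-- ===== PRECONDITION & SPEC =====
-- Pre_ excludes the empty list, on which A loops forever and B raises ZeroDivisionError.
def Pre_handleIndex (index : Int) (dic : List Int) : Prop := dic ≠ []
instance (index : Int) (dic : List Int) : Decidable (Pre_handleIndex index dic) := by unfold Pre_handleIndex; infer_instance
def pvWitness_handleIndex : Int × List Int := (-7, [1, 2, 3])

def Spec_handleIndex (index : Int) (dic : List Int) (out : Int) : Prop := out = handleIndex_alt index dic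
instance (index : Int) (dic : List Int) (out : Int) : Decidable (Spec_handleIndex index dic out) := by unfold Spec_handleIndex; infer_instance

-- ===== CLAIM (what is proved, stated in full; the proofs are below) =====
def Claim_equal_handleIndex : Prop := ∀ (index : Int) (dic : List Int), Dom_handleIndex index dic → Pre_handleIndex index dic → Spec_handleIndex index dic (handleIndex index dic)

-- ===== LEMMAS AND PROOFS =====
theorem emod_sub_self (a n : Int) : (a - n) % n = a % n := by
  simpa using Int.add_mul_emod_self_left (a := a) (b := n) (c := -1)

theorem handleIndexGo_eq (n : Nat) (hn : 0 < n) (index : Int) :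
    handleIndexGo n index =
      (if index ≥ 0 then PySem.Int.mod index n else -(PySem.Int.mod (-index) n)) := by
  rw [PySem.Int.mod_eq_emod_of_pos (by exact_mod_cast hn),
      PySem.Int.mod_eq_emod_of_pos (by exact_mod_cast hn)]
  induction index using handleIndexGo.induct n with
  | case1 index hcond hneg ih =>
    rw [handleIndexGo, if_pos hcond, if_pos hneg, ih,
        if_neg (not_le.mpr hneg), abs_of_neg hneg]
    by_cases h0 : (n : Int) + index < 0
    · rw [if_neg (by omega : ¬ ((n : Int) - -index ≥ 0)),
          show -((n : Int) - -index) = -index - (n : Int) from by ring, emod_sub_self]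
    · rw [show (n : Int) - -index = 0 from by
            rcases hcond with ⟨-, h⟩; rw [abs_of_neg hneg] at h; omega,
          if_pos (le_refl 0), Int.zero_emod,
          show (-index : Int) = (n : Int) from by
            rcases hcond with ⟨-, h⟩; rw [abs_of_neg hneg] at h; omega,
          Int.emod_self, neg_zero]
  | case2 index hcond hneg hpos ih =>
    rw [handleIndexGo, if_pos hcond, if_neg hneg, if_pos hpos, ih]
    rcases hcond with ⟨-, h⟩
    rw [abs_of_pos hpos] at h
    rw [if_pos (by omega : index - (n : Int) ≥ 0), if_pos (by omega : index ≥ 0),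
        emod_sub_self]
  | case3 index hcond hneg hpos =>
    have h0 : index = 0 := by omega
    subst h0
    simp at hcond
    omega
  | case4 index hcond =>
    rw [handleIndexGo, if_neg hcond]
    have habs : |index| < n := by
      rcases not_and_or.mp hcond with h | h
      · omega
      · omega
    by_cases h0 : index ≥ 0
    · rw [if_pos h0, Int.emod_eq_of_lt h0 (by rw [abs_of_nonneg h0] at habs; omega)]
    · rw [if_neg h0,
          Int.emod_eq_of_lt (by omega) (by rw [abs_of_neg (by omega : index < 0)] at habs; omega),
          neg_neg]

-- ===== VERDICT (by name: the statement is the Claim_ definition above) =====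
theorem handleIndex_spec : Claim_equal_handleIndex := by
  intro index dic _ hpre
  have hn : 0 < dic.length := List.length_pos_iff.mpr hpre
  unfold Spec_handleIndex handleIndex handleIndex_alt
  rw [handleIndexGo_eq dic.length hn index]
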